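-- pv_equiv track=rewrite | github.com/Benson-su/Leetcode | array/1451_Rearrange_Words_in_a_Sentence.py | arrangeWords
-- ===== SOURCE A (Python) =====
-- def arrangeWords(text):
--     """
--     :type text: str
--     :rtype: str
--     """
--     len_dict = {}
--     ret = ""
--     text = text[0].lower() + text[1:]
--     for letter in text.split(" "):
--         if len(letter) not in len_dict:
--             len_dict[len(letter)] = [letter]
--         else:
--             len_dict[len(letter)].append(letter)
--     for length in sorted(len_dict.keys()):
--         for letter in len_dict[length]:
--             ret += (letter+" ")
--     ret = ret[:-1]
--     ret = ret[0].upper() + ret[1:]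
--     return ret
-- ===== SOURCE B (Python) =====
-- def arrangeWords(text):
--     """
--     :type text: str
--     :rtype: str
--     """
--     t = text[0].lower() + text[1:]
--     words = sorted(t.split(" "), key=len)
--     ret = " ".join(words)
--     return ret[0].upper() + ret[1:]
-- ===== Notes on version B (the rewrite author's own statement) =====
-- stated objective: simpler
-- what changed: Replaced A's length-keyed bucket dict plus sort-distinct-keys-then-nested-traversal with a single stable sort of the word list keyed by length, joined directly.
import Mathlib
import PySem

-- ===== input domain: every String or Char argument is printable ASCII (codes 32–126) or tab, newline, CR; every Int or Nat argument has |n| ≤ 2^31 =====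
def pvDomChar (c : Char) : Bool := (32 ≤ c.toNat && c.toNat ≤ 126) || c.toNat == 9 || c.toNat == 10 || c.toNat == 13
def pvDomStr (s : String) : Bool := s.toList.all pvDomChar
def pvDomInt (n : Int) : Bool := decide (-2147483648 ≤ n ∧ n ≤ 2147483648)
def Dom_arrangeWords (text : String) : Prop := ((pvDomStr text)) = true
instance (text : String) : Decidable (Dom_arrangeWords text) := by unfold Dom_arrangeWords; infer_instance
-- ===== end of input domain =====

-- B replaces A's length-keyed bucket dict + sorted-keys traversal by one stable sort of the word list keyed by length (objective: simpler).

-- ===== PORT A =====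
-- A: bucket words by length in a dict, then emit buckets in sorted-key order, fixing case at both ends.
def arrangeWords (text : String) : String :=
  match text.toList with
  | [] => ""          -- text[0] raises IndexError on the empty string: outside Pre_
  | c :: rest =>
    -- text = text[0].lower() + text[1:]  (one ASCII char: .lower() is lowerChar)
    let t := PySem.Chars.lowerChar c :: rest
    let words := PySem.Chars.splitOn t [' ']
    let d := words.foldl (fun d w =>
      if d.contains ((w.length : Int)) = false
      then d.insert ((w.length : Int)) [w]                        -- len_dict[len(letter)] = [letter]
      else d.modify ((w.length : Int)) [] (fun l => l ++ [w]))    -- len_dict[len(letter)].append(letter)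
      (PySem.Dict.empty : PySem.Dict Int (List (List Char)))
    let ret := (PySem.List.sorted d.keys (fun k => k) false).foldl
      (fun r k => (d.getD k []).foldl (fun r w => r ++ (w ++ [' '])) r) ([] : List Char)
    let ret := PySem.List.slice ret none (some (-1))              -- ret = ret[:-1]
    match ret with
    | [] => ""        -- ret[0] raises IndexError (only reachable on the empty string): outside Pre_
    | c2 :: r2 => String.ofList (PySem.Chars.upperChar c2 :: r2)

-- ===== PORT B =====
-- B: lowercase the head, split on ' ', one stable sort by length, join, re-capitalize.
def arrangeWords_alt (text : String) : String :=
  match text.toList with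
  | [] => ""          -- text[0] raises IndexError on the empty string: outside Pre_
  | c :: rest =>
    let words := PySem.Chars.splitOn (PySem.Chars.lowerChar c :: rest) [' ']
    let ret := PySem.Chars.join [' '] (PySem.List.sorted words (fun w => (w.length : Int)) false)
    match ret with
    | [] => ""        -- ret[0] raises IndexError (only reachable on the empty string): outside Pre_
    | c2 :: r2 => String.ofList (PySem.Chars.upperChar c2 :: r2)

-- ===== PRECONDITION & SPEC =====
-- Pre_ excludes only the empty string, on which both Pythons raise IndexError at text[0].
def Pre_arrangeWords (text : String) : Prop := text ≠ ""
instance (text : String) : Decidable (Pre_arrangeWords text) := by unfold Pre_arrangeWords; infer_instance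
def pvWitness_arrangeWords : String := "Leetcode is cool"

def Spec_arrangeWords (text : String) (out : String) : Prop := out = arrangeWords_alt text
instance (text : String) (out : String) : Decidable (Spec_arrangeWords text out) := by unfold Spec_arrangeWords; infer_instance

-- ===== CLAIM (what is proved, stated in full; the proofs are below) =====
def Claim_equal_arrangeWords : Prop := ∀ (text : String), Dom_arrangeWords text → Pre_arrangeWords text → Spec_arrangeWords text (arrangeWords text)

-- ===== LEMMAS AND PROOFS =====

-- insertBy passes over a block none of whose elements trigger `before`
theorem pv_insertBy_append {α : Type} (before : α → α → Bool) (x : α) (as bs : List α)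
    (h : ∀ y ∈ as, before x y = false) :
    PySem.List.insertBy before x (as ++ bs) = as ++ PySem.List.insertBy before x bs := by
  induction as with
  | nil => rfl
  | cons a as ih =>
    simp only [List.cons_append, PySem.List.insertBy, h a (by simp)]
    simp [ih (fun y hy => h y (by simp [hy]))]

-- insertBy puts x in front when every element triggers `before`
theorem pv_insertBy_front {α : Type} (before : α → α → Bool) (x : α) (l : List α)
    (h : ∀ y ∈ l, before x y = true) :
    PySem.List.insertBy before x l = x :: l := by
  cases l with
  | nil => rfl
  | cons a t => simp [PySem.List.insertBy, h a (by simp)]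

-- every element of a flatMap over key-homogeneous buckets has its key in the key list
theorem pv_key_of_mem_flatMap {α : Type} (kl : α → Int) (F : Int → List α) (ks : List Int)
    (hF : ∀ c ∈ ks, ∀ y ∈ F c, kl y = c) :
    ∀ y ∈ ks.flatMap F, ∃ c ∈ ks, kl y = c := by
  intro y hy
  rcases List.mem_flatMap.mp hy with ⟨c, hc, hyc⟩
  exact ⟨c, hc, hF c hc y hyc⟩

-- inserting one element into a concatenation of strictly-increasing buckets appends it to its bucket
theorem pv_insertBy_buckets {α : Type} (kl : α → Int) (w : α) (ks : List Int) (F : Int → List α)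
    (hs : ks.Pairwise (· < ·)) (hmem : kl w ∈ ks)
    (hF : ∀ c ∈ ks, ∀ y ∈ F c, kl y = c) :
    PySem.List.insertBy (fun a b => decide (kl a < kl b)) w (ks.flatMap F) =
      ks.flatMap (fun c => F c ++ if kl w == c then [w] else []) := by
  induction ks with
  | nil => simp at hmem
  | cons c ks ih =>
    have hsk := (List.pairwise_cons.mp hs).1
    have hs' := (List.pairwise_cons.mp hs).2
    simp only [List.flatMap_cons]
    by_cases hwc : kl w = c
    · -- w belongs to the head bucket: pass F c, then land in front of all later buckets
      rw [pv_insertBy_append _ _ _ _ (fun y hy => by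
        have hk := hF c (by simp) y hy; simp [hk, hwc])]
      rw [pv_insertBy_front _ _ _ (fun y hy => by
        rcases pv_key_of_mem_flatMap kl F ks (fun c' hc' => hF c' (by simp [hc'])) y hy with ⟨c', hc', hkc⟩
        have := hsk c' hc'
        simp [hkc, hwc]; omega)]
      have hrest : ks.flatMap (fun c' => F c' ++ if kl w == c' then [w] else [])
          = ks.flatMap F := by
        apply List.flatMap_congr
        intro c' hc'
        have hne : ¬ kl w = c' := by have := hsk c' hc'; omega
        simp [hne]
      rw [hrest]
      simp [hwc]
    · -- w belongs to a later bucket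
      have hmem' : kl w ∈ ks := by
        rcases List.mem_cons.mp hmem with h | h
        · exact absurd h hwc
        · exact h
      have hgt : c < kl w := hsk _ hmem'
      rw [pv_insertBy_append _ _ _ _ (fun y hy => by
        have hk := hF c (by simp) y hy
        simp [hk]; omega)]
      rw [ih hs' hmem' (fun c' hc' => hF c' (by simp [hc']))]
      have hne : ¬ kl w = c := hwc
      simp [hne]

-- stable sort by key = buckets traversed in strictly-increasing key order
theorem pv_sorted_eq_buckets {α : Type} (kl : α → Int) (ws : List α) (ks : List Int)
    (hs : ks.Pairwise (· < ·)) (hmem : ∀ w ∈ ws, kl w ∈ ks) :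
    PySem.List.sorted ws kl false =
      ks.flatMap (fun c => ws.filter (fun w => kl w == c)) := by
  induction ws using List.reverseRecOn with
  | nil => simp [PySem.List.sorted_eq_foldl_insertBy]
  | append_singleton ws w ih =>
    have hws : ∀ w' ∈ ws, kl w' ∈ ks := fun w' hw' => hmem w' (by simp [hw'])
    rw [PySem.List.sorted_eq_foldl_insertBy, List.foldl_append, List.foldl_cons, List.foldl_nil,
      ← PySem.List.sorted_eq_foldl_insertBy, ih hws]
    rw [pv_insertBy_buckets kl w ks _ hs (hmem w (by simp))
      (fun c hc y hy => eq_of_beq (List.mem_filter.mp hy).2)]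
    apply List.flatMap_congr
    intro c hc
    simp [List.filter_append, List.filter_cons]

-- " ".join with trailing separator, for nonempty lists
theorem pv_flatMap_eq_join_concat (ys : List (List Char)) (h : ys ≠ []) :
    ys.flatMap (fun w => w ++ [' ']) = PySem.Chars.join [' '] ys ++ [' '] := by
  induction ys with
  | nil => exact absurd rfl h
  | cons y t ih =>
    cases t with
    | nil => simp [PySem.Chars.join_singleton]
    | cons z t' =>
      rw [List.flatMap_cons, ih (by simp), PySem.Chars.join_cons_cons]
      simp

-- " ".join ys is (concatenation of the (y + " "))[:-1]
theorem pv_join_eq_dropLast (ys : List (List Char)) :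
    PySem.Chars.join [' '] ys = (ys.flatMap (fun w => w ++ [' '])).dropLast := by
  cases ys with
  | nil => simp [PySem.Chars.join_nil]
  | cons y t =>
    rw [pv_flatMap_eq_join_concat _ (by simp), List.dropLast_concat]

-- A's bucket dict (proof-side name for A's fold; used only below the claim block)
def pvDictA (ws : List (List Char)) : PySem.Dict Int (List (List Char)) :=
  ws.foldl (fun d w =>
    if d.contains ((w.length : Int)) = false
    then d.insert ((w.length : Int)) [w]
    else d.modify ((w.length : Int)) [] (fun l => l ++ [w]))
    (PySem.Dict.empty : PySem.Dict Int (List (List Char)))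

-- the two result character lists agree for any word list
theorem pv_main (ws : List (List Char)) :
    PySem.List.slice
      ((PySem.List.sorted (pvDictA ws).keys (fun k => k) false).foldl
        (fun r k => ((pvDictA ws).getD k []).foldl (fun r w => r ++ (w ++ [' '])) r)
        ([] : List Char))
      none (some (-1))
    = PySem.Chars.join [' '] (PySem.List.sorted ws (fun w => (w.length : Int)) false) := by
  -- the branching dict update IS `modify`
  have hstep : (fun (d : PySem.Dict Int (List (List Char))) (w : List Char) =>
      if d.contains ((w.length : Int)) = false
      then d.insert ((w.length : Int)) [w]
      else d.modify ((w.length : Int)) [] (fun l => l ++ [w]))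
      = fun d w => d.modify ((w.length : Int)) [] (fun l => l ++ [w]) := by
    funext d w
    by_cases hc : d.contains ((w.length : Int)) = false
    · simp [hc, PySem.Dict.modify, PySem.Dict.getD_of_not_contains d [] hc]
    · simp [hc]
  have hd : pvDictA ws = ws.foldl
      (fun d w => d.modify ((w.length : Int)) [] (fun l => l ++ [w]))
      (PySem.Dict.empty : PySem.Dict Int (List (List Char))) := by
    rw [pvDictA, hstep]
  -- the buckets
  have hgetD : ∀ k, (pvDictA ws).getD k [] = ws.filter (fun w => ((w.length : Int)) == k) := by
    intro k
    have h := PySem.Dict.getD_foldl_modify_append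
      (ws.map (fun w => (((w.length : Int)), w)))
      (PySem.Dict.empty : PySem.Dict Int (List (List Char))) k
    rw [List.foldl_map] at h
    rw [hd, h, PySem.Dict.getD_empty, List.nil_append, List.filter_map, List.map_map]
    simp [Function.comp_def]
  -- the key set
  have hkeys : (pvDictA ws).keys = PySem.Set.ofList (ws.map (fun w => ((w.length : Int)))) := by
    rw [hd, PySem.Dict.keys_foldl_modify_key ws (fun w => ((w.length : Int))) []
      (fun _ w => fun l => l ++ [w]) PySem.Dict.empty]
    rfl
  simp only [PySem.List.foldl_append_eq_flatMap, List.nil_append]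
  simp only [hgetD, hkeys, PySem.List.slice_to_neg_one]
  rw [← List.flatMap_assoc,
    ← pv_sorted_eq_buckets (fun w => ((w.length : Int))) ws _
      (PySem.List.sorted_ofList_pairwise_lt (ws.map (fun w => ((w.length : Int)))))
      (fun w hw => by
        rw [PySem.List.mem_sorted, PySem.Set.mem_ofList]
        exact List.mem_map_of_mem hw),
    pv_join_eq_dropLast]

-- ===== VERDICT (by name: the statement is the Claim_ definition above) =====
theorem arrangeWords_spec : Claim_equal_arrangeWords := by
  intro text _ _
  unfold Spec_arrangeWords arrangeWords arrangeWords_alt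
  cases h : text.toList with
  | nil => rfl
  | cons c rest =>
    have hm := pv_main (PySem.Chars.splitOn (PySem.Chars.lowerChar c :: rest) [' '])
    simp only [pvDictA] at hm
    dsimp only
    rw [hm]
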